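-- pv_equiv track=rewrite | github.com/Goldyapper/hackerank-solution | chess tournament.py | getPotentialOfWinner
-- ===== SOURCE A (Python) =====
-- def getPotentialOfWinner(potential, k):
--     # Write your code here
--     n = len(potential)
--
--     if k >= n:
--         return max(potential)
--
--     current_winner = potential[0]
--     consecutive_wins = 0
--     i = 1
--
--     while True:
--         challenger = potential[i]
--
--         if current_winner > challenger:
--             consecutive_wins += 1
--         else:
--             current_winner = challenger
--             consecutive_wins = 1
--         i += 1
--
--         if consecutive_wins == k:
--             return current_winner
--
--         if i == n:
--             i = 1
-- ===== SOURCE B (Python) =====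
-- def getPotentialOfWinner(potential, k):
--     n = len(potential)
--     if k >= n:
--         return max(potential)
--     current = potential[0]
--     wins = 0
--     for challenger in potential[1:]:
--         if current > challenger:
--             wins += 1
--         else:
--             current = challenger
--             wins = 1
--         if wins == k:
--             return current
--     return max(potential)
-- ===== Notes on version B (the rewrite author's own statement) =====
-- stated objective: simpler
-- what changed: Replaces A's unbounded while-True circular re-simulation (with manual index wraparound) by a single bounded pass over potential[1:] with an early return, falling back to max(potential) when the pass completes, since after one full pass the running winner is the global maximum and wins every further round.
import Mathlib
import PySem

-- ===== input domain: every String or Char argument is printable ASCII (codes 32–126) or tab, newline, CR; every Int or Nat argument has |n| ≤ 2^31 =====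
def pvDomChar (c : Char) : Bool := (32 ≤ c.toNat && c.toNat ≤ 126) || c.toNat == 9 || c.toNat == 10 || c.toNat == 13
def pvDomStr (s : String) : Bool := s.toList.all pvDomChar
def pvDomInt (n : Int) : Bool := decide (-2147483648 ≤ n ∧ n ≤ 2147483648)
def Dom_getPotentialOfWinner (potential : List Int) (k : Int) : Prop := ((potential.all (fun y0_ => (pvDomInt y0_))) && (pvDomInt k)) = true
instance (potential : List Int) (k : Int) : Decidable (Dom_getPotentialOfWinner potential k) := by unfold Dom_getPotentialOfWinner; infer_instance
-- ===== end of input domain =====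

-- B replaces A's unbounded circular while-True simulation by one bounded pass over
-- potential[1:] plus a max(potential) fallback (objective: simpler).

-- ===== PORT A =====
-- A's `while True` loop, step for step; fuel only makes it total (none = out of fuel /
-- IndexError), Pre_ guarantees the fuel suffices.
def aLoop (potential : List Int) (n k : Int) (cw wins i : Int) : Nat → Option Int
  | 0 => none
  | fuel + 1 =>
    match PySem.List.pyGet? potential i with
    | none => none                                   -- potential[i]: IndexError
    | some challenger =>
      let st := if cw > challenger then (cw, wins + 1) else (challenger, 1)
      let i' := i + 1
      if st.2 = k then some st.1
      else aLoop potential n k st.1 st.2 (if i' = n then 1 else i') fuel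

def getPotentialOfWinner (potential : List Int) (k : Int) : Int :=
  let n : Int := potential.length
  if k ≥ n then (PySem.List.max? potential (fun y => y)).getD 0    -- max([]) raises: outside Pre_
  else
    match PySem.List.pyGet? potential 0 with
    | none => 0                                      -- potential[0]: IndexError, outside Pre_
    | some cw0 => (aLoop potential n k cw0 0 1 (3 * potential.length + 3)).getD 0

-- ===== PORT B =====
def bLoop (k cw wins : Int) : List Int → Option Int
  | [] => none
  | c :: cs =>
    let st := if cw > c then (cw, wins + 1) else (c, 1)
    if st.2 = k then some st.1 else bLoop k st.1 st.2 cs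

def getPotentialOfWinner_alt (potential : List Int) (k : Int) : Int :=
  let n : Int := potential.length
  if k ≥ n then (PySem.List.max? potential (fun y => y)).getD 0
  else
    match PySem.List.pyGet? potential 0 with
    | none => 0                                      -- potential[0]: IndexError, outside Pre_
    | some cw0 =>
      match bLoop k cw0 0 (PySem.List.slice potential (some 1) none) with
      | some w => w
      | none => (PySem.List.max? potential (fun y => y)).getD 0

-- ===== PRECONDITION & SPEC =====
-- Pre_ holds exactly on the inputs where A returns: a nonempty list and either k ≥ n, or
-- k ≥ 1 together with a circular window of k-1 consecutive sub-maximal entries of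
-- potential[1:] (without such a window A loops forever; on [] or on n = 1 with k ≤ 0 it raises).
def Pre_getPotentialOfWinner (potential : List Int) (k : Int) : Prop :=
  potential ≠ [] ∧
    ((potential.length : Int) ≤ k ∨
      (1 ≤ k ∧ ∃ j < (potential.drop 1).length, ∀ t < k.toNat, 1 ≤ t →
        (potential.drop 1).getD ((j + t) % (potential.drop 1).length) 0 <
          (PySem.List.max? potential (fun y => y)).getD 0))
instance (potential : List Int) (k : Int) : Decidable (Pre_getPotentialOfWinner potential k) := by unfold Pre_getPotentialOfWinner; infer_instance

def pvWitness_getPotentialOfWinner : List Int × Int := ([3, 1, 2], 2)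

def Spec_getPotentialOfWinner (potential : List Int) (k : Int) (out : Int) : Prop := out = getPotentialOfWinner_alt potential k
instance (potential : List Int) (k : Int) (out : Int) : Decidable (Spec_getPotentialOfWinner potential k out) := by unfold Spec_getPotentialOfWinner; infer_instance

-- ===== CLAIM (what is proved, stated in full; the proofs are below) =====
def Claim_equal_getPotentialOfWinner : Prop := ∀ (potential : List Int) (k : Int), Dom_getPotentialOfWinner potential k → Pre_getPotentialOfWinner potential k → Spec_getPotentialOfWinner potential k (getPotentialOfWinner potential k)

-- ===== LEMMAS AND PROOFS =====

-- the shared inner step of both loops, as a fold function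
def pvStep (st : Int × Int) (c : Int) : Int × Int :=
  if st.1 > c then (st.1, st.2 + 1) else (c, 1)

theorem pvModSucc (a L : Nat) (hL : 0 < L) :
    (if (a % L) + 1 = L then 0 else (a % L) + 1) = (a + 1) % L := by
  have hlt : a % L < L := Nat.mod_lt _ hL
  rcases Nat.lt_or_ge (a % L + 1) L with h | h
  · rw [if_neg (by omega)]
    have hL2 : 1 < L := by omega
    rw [Nat.add_mod a 1 L, Nat.mod_eq_of_lt hL2, Nat.mod_eq_of_lt h]
  · have he : a % L + 1 = L := by omega
    rw [if_pos he]
    rcases Nat.eq_or_lt_of_le hL with h1 | h1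
    · subst h1
      show 0 = (a + 1) % 1
      omega
    · rw [Nat.add_mod a 1 L, Nat.mod_eq_of_lt h1, he, Nat.mod_self]

theorem pvGetTail (p0 : Int) (tail : List Int) (q : Nat) (hq : q < tail.length) :
    PySem.List.pyGet? (p0 :: tail) ((q : Int) + 1) = some (tail.getD q 0) := by
  rw [show ((q : Int) + 1) = ((q + 1 : Nat) : Int) by push_cast; ring]
  rw [PySem.List.pyGet?_natCast]
  simp [List.getElem?_cons_succ, List.getD_eq_getElem?_getD, List.getElem?_eq_getElem hq]

theorem pvFoldFst (l : List Int) : ∀ st : Int × Int, (l.foldl pvStep st).1 = l.foldl max st.1 := by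
  induction l with
  | nil => intro st; rfl
  | cons c cs ih =>
    intro st
    rw [List.foldl_cons, List.foldl_cons, ih]
    congr 1
    by_cases h : st.1 > c
    · simp [pvStep, h, max_eq_left (le_of_lt h)]
    · simp [pvStep, h, max_eq_right (not_lt.mp h)]

theorem pvBNone (k : Int) : ∀ (cs : List Int) (cw w : Int), 0 ≤ w → w < k →
    bLoop k cw w cs = none →
    0 ≤ (cs.foldl pvStep (cw, w)).2 ∧ (cs.foldl pvStep (cw, w)).2 < k := by
  intro cs
  induction cs with
  | nil => intro cw w h0 hk _; exact ⟨h0, hk⟩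
  | cons c cs ih =>
    intro cw w h0 hk hb
    rw [List.foldl_cons]
    by_cases h : cw > c
    · have hst : pvStep (cw, w) c = (cw, w + 1) := by simp [pvStep, h]
      rw [hst]
      simp only [bLoop, if_pos h] at hb
      by_cases hk2 : w + 1 = k
      · rw [if_pos (show ((cw, w + 1) : Int × Int).2 = k from hk2)] at hb
        exact absurd hb (by simp)
      · rw [if_neg (show ¬ ((cw, w + 1) : Int × Int).2 = k from hk2)] at hb
        exact ih cw (w + 1) (by omega) (by omega) hb
    · have hst : pvStep (cw, w) c = (c, 1) := by simp [pvStep, h]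
      rw [hst]
      simp only [bLoop, if_neg h] at hb
      by_cases hk2 : (1 : Int) = k
      · rw [if_pos (show ((c, 1) : Int × Int).2 = k from hk2)] at hb
        exact absurd hb (by simp)
      · rw [if_neg (show ¬ ((c, 1) : Int × Int).2 = k from hk2)] at hb
        exact ih c 1 (by omega) (by omega) hb

theorem pvPass1 (p0 : Int) (tail : List Int) (k : Int) :
    ∀ (cs : List Int) (q : Nat) (cw w : Int) (rest : Nat),
      cs ≠ [] → tail.drop q = cs →
      aLoop (p0 :: tail) ((p0 :: tail).length : Int) k cw w ((q : Int) + 1) (cs.length + rest) =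
        (match bLoop k cw w cs with
         | some v => some v
         | none => aLoop (p0 :: tail) ((p0 :: tail).length : Int) k
             (cs.foldl pvStep (cw, w)).1 (cs.foldl pvStep (cw, w)).2 1 rest) := by
  intro cs
  induction cs with
  | nil => intro q cw w rest h _; exact absurd rfl h
  | cons c cs ih =>
    intro q cw w rest _ hdrop
    have hq : q < tail.length := by
      have := congrArg List.length hdrop
      simp only [List.length_drop, List.length_cons] at this
      omega
    have hlen : (c :: cs).length + rest = (cs.length + rest) + 1 := by
      simp [List.length_cons]; omega
    have hget : PySem.List.pyGet? (p0 :: tail) ((q : Int) + 1) = some c := by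
      rw [pvGetTail p0 tail q hq]
      have := congrArg List.head? hdrop
      rw [List.head?_drop] at this
      simp only [List.head?_cons] at this
      simp [List.getD_eq_getElem?_getD, this]
    rw [hlen]
    simp only [aLoop, hget]
    rw [List.foldl_cons]
    have hstep : ∀ x : Int, (if cw > x then (cw, w + 1) else (x, 1)) = pvStep (cw, w) x := by
      intro x; simp [pvStep]
    simp only [bLoop, hstep]
    by_cases hk2 : (pvStep (cw, w) c).2 = k
    · simp only [if_pos hk2]
    · simp only [if_neg hk2]
      rcases eq_or_ne cs [] with rfl | hcs
      · -- last element of the pass: the index wraps to 1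
        have hqL : q + 1 = tail.length := by
          have := congrArg List.length hdrop
          simp only [List.length_drop, List.length_cons, List.length_nil] at this
          omega
        have hwrap : ((q : Int) + 1 + 1 = ((p0 :: tail).length : Int)) := by
          simp only [List.length_cons]; push_cast; omega
        rw [if_pos hwrap]
        simp [bLoop]
      · -- continue the pass at index q+1
        have hq1 : q + 1 < tail.length := by
          have := congrArg List.length hdrop
          simp only [List.length_drop, List.length_cons] at this
          have : cs.length ≠ 0 := by simpa using hcs
          omega
        have hnw : ¬ ((q : Int) + 1 + 1 = ((p0 :: tail).length : Int)) := by
          simp only [List.length_cons]; push_cast; omega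
        rw [if_neg hnw]
        have hdrop' : tail.drop (q + 1) = cs := by
          rw [← List.tail_drop, hdrop, List.tail_cons]
        have := ih (q + 1) (pvStep (cw, w) c).1 (pvStep (cw, w) c).2 rest hcs hdrop'
        rw [show ((q : Int) + 1 + 1) = (((q + 1 : Nat) : Int) + 1) by push_cast; ring]
        exact this

theorem pvInc (p0 : Int) (tail : List Int) (k m : Int) (j : Nat)
    (hL : 0 < tail.length)
    (hW : ∀ s : Nat, 1 ≤ s → (s : Int) < k → tail.getD ((j + s) % tail.length) 0 < m) :
    ∀ (t : Nat), 1 ≤ t → ∀ (u fuel : Nat), 1 ≤ u → (u : Int) + (t : Int) ≤ k → t ≤ fuel →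
      aLoop (p0 :: tail) ((p0 :: tail).length : Int) k m (k - (t : Int))
        ((((j + u) % tail.length : Nat) : Int) + 1) fuel = some m := by
  intro t
  induction t with
  | zero => intro h; omega
  | succ t ih =>
    intro _ u fuel hu huk hf
    obtain ⟨f, rfl⟩ : ∃ f, fuel = f + 1 := ⟨fuel - 1, by omega⟩
    have hr : (j + u) % tail.length < tail.length := Nat.mod_lt _ hL
    have hget := pvGetTail p0 tail ((j + u) % tail.length) hr
    have hc : tail.getD ((j + u) % tail.length) 0 < m := by
      apply hW u hu
      push_cast at huk ⊢; omega
    simp only [aLoop, hget]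
    have hgt : m > tail.getD ((j + u) % tail.length) 0 := hc
    simp only [if_pos hgt]
    rcases Nat.eq_zero_or_pos t with rfl | ht
    · -- last needed win: wins becomes k, return m
      have : k - ((0 : Nat) + 1 : Nat) + 1 = k := by push_cast; ring
      rw [if_pos (by push_cast; ring)]
    · -- t ≥ 1 more wins needed
      have hne : ¬ (k - ((t + 1 : Nat) : Int) + 1 = k) := by push_cast; omega
      rw [if_neg hne]
      have hidx : (if (((j + u) % tail.length : Nat) : Int) + 1 + 1 = ((p0 :: tail).length : Int)
          then (1 : Int) else (((j + u) % tail.length : Nat) : Int) + 1 + 1)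
          = (((j + (u + 1)) % tail.length : Nat) : Int) + 1 := by
        have hms := pvModSucc (j + u) tail.length hL
        by_cases hw : (j + u) % tail.length + 1 = tail.length
        · rw [if_pos (by simp only [List.length_cons]; omega)]
          rw [show j + (u + 1) = (j + u) + 1 by ring, ← hms, if_pos hw]
          norm_num
        · rw [if_neg (by simp only [List.length_cons]; omega)]
          rw [show j + (u + 1) = (j + u) + 1 by ring, ← hms, if_neg hw]
          push_cast; ring
      rw [hidx]
      have hwins : k - ((t + 1 : Nat) : Int) + 1 = k - ((t : Nat) : Int) := by push_cast; ring
      rw [hwins]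
      exact ih ht (u + 1) f (by omega) (by push_cast at huk ⊢; omega) (by omega)

theorem pvAdv (p0 : Int) (tail : List Int) (k m : Int) (j : Nat)
    (hm : ∀ c ∈ tail, c ≤ m) (hj : j < tail.length) (hk1 : 1 ≤ k)
    (hW : ∀ s : Nat, 1 ≤ s → (s : Int) < k → tail.getD ((j + s) % tail.length) 0 < m) :
    ∀ (d q : Nat) (w : Int) (fuel : Nat), q < tail.length →
      ((q ≤ j ∧ d = j - q) ∨ (j < q ∧ d = j + tail.length - q)) →
      0 ≤ w → w < k → d + k.toNat + 1 ≤ fuel →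
      aLoop (p0 :: tail) ((p0 :: tail).length : Int) k m w ((q : Int) + 1) fuel = some m := by
  have hL : 0 < tail.length := by omega
  intro d
  induction d with
  | zero =>
    intro q w fuel hq hD h0 hwk hf
    have hqj : q = j := by omega
    obtain ⟨f, rfl⟩ : ∃ f, fuel = f + 1 := ⟨fuel - 1, by omega⟩
    have hget := pvGetTail p0 tail q hq
    have hcm : tail.getD q 0 ≤ m := hm _ (by rw [List.getD_eq_getElem tail 0 hq]; exact List.getElem_mem hq)
    simp only [aLoop, hget]
    -- after this step cw is m and wins is w+1 or 1
    have hmain : ∀ w' : Int, 1 ≤ w' → w' ≤ k →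
        (if w' = k then some m
         else aLoop (p0 :: tail) ((p0 :: tail).length : Int) k m w'
           (if (q : Int) + 1 + 1 = ((p0 :: tail).length : Int) then 1 else (q : Int) + 1 + 1) f)
        = some m := by
      intro w' h1 h2
      by_cases hkk : w' = k
      · rw [if_pos hkk]
      · rw [if_neg hkk]
        have ht0 : (1 : Int) ≤ k - w' := by omega
        have htn : ((k - w').toNat : Int) = k - w' := Int.toNat_of_nonneg (by omega)
        have hidx : (if (q : Int) + 1 + 1 = ((p0 :: tail).length : Int) then (1 : Int)
            else (q : Int) + 1 + 1) = (((j + 1) % tail.length : Nat) : Int) + 1 := by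
          by_cases hw : q + 1 = tail.length
          · rw [if_pos (by simp only [List.length_cons]; omega)]
            rw [show (j + 1) % tail.length = 0 by
              rw [show j + 1 = tail.length by omega, Nat.mod_self]]
            norm_num
          · rw [if_neg (by simp only [List.length_cons]; omega)]
            rw [Nat.mod_eq_of_lt (by omega)]
            push_cast; omega
        rw [hidx]
        have := pvInc p0 tail k m j hL hW (k - w').toNat (by omega) 1 f (le_refl 1)
          (by rw [htn]; push_cast; omega) (by omega)
        rw [htn, show k - (k - w') = w' by ring] at this
        exact this
    by_cases hgt : m > tail.getD q 0
    · simp only [if_pos hgt]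
      exact hmain (w + 1) (by omega) (by omega)
    · have hce : tail.getD q 0 = m := le_antisymm hcm (not_lt.mp hgt)
      rw [if_neg hgt, hce]
      exact hmain 1 (le_refl 1) hk1
  | succ d ih =>
    intro q w fuel hq hD h0 hwk hf
    obtain ⟨f, rfl⟩ : ∃ f, fuel = f + 1 := ⟨fuel - 1, by omega⟩
    have hget := pvGetTail p0 tail q hq
    have hcm : tail.getD q 0 ≤ m := hm _ (by rw [List.getD_eq_getElem tail 0 hq]; exact List.getElem_mem hq)
    simp only [aLoop, hget]
    have hqj : q ≠ j := by omega
    have hmain : ∀ w' : Int, 1 ≤ w' → w' ≤ k →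
        (if w' = k then some m
         else aLoop (p0 :: tail) ((p0 :: tail).length : Int) k m w'
           (if (q : Int) + 1 + 1 = ((p0 :: tail).length : Int) then 1 else (q : Int) + 1 + 1) f)
        = some m := by
      intro w' h1 h2
      by_cases hkk : w' = k
      · rw [if_pos hkk]
      · rw [if_neg hkk]
        by_cases hw : q + 1 = tail.length
        · rw [if_pos (by simp only [List.length_cons]; omega)]
          have := ih 0 w' f hL (by omega) (by omega) (by omega) (by omega)
          simpa using this
        · rw [if_neg (by simp only [List.length_cons]; omega)]
          have := ih (q + 1) w' f (by omega) (by omega) (by omega) (by omega) (by omega)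
          rw [show ((q : Int) + 1 + 1) = (((q + 1 : Nat) : Int) + 1) by push_cast; ring]
          exact this
    by_cases hgt : m > tail.getD q 0
    · simp only [if_pos hgt]
      exact hmain (w + 1) (by omega) (by omega)
    · have hce : tail.getD q 0 = m := le_antisymm hcm (not_lt.mp hgt)
      rw [if_neg hgt, hce]
      exact hmain 1 (le_refl 1) hk1

-- ===== VERDICT (by name: the statement is the Claim_ definition above) =====
theorem getPotentialOfWinner_spec : Claim_equal_getPotentialOfWinner := by
  intro potential k _ hpre
  unfold Spec_getPotentialOfWinner
  obtain ⟨hne, hdis⟩ := hpre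
  obtain ⟨p0, tail, rfl⟩ : ∃ p0 tail, potential = p0 :: tail := by
    cases potential with
    | nil => exact absurd rfl hne
    | cons a l => exact ⟨a, l, rfl⟩
  by_cases hkn : k ≥ ((p0 :: tail).length : Int)
  · simp only [getPotentialOfWinner, getPotentialOfWinner_alt]
    rw [if_pos hkn, if_pos hkn]
  · have hdis2 : 1 ≤ k ∧ ∃ j < tail.length, ∀ t < k.toNat, 1 ≤ t →
        tail.getD ((j + t) % tail.length) 0 < (PySem.List.max? (p0 :: tail) (fun y => y)).getD 0 := by
      rcases hdis with h | h
      · exact absurd h (by omega)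
      · simpa using h
    obtain ⟨hk1, j, hj, hWpre⟩ := hdis2
    have hL : 0 < tail.length := by omega
    set m : Int := (PySem.List.max? (p0 :: tail) (fun y => y)).getD 0 with hmdef
    have hmfold : m = tail.foldl max p0 := by
      rw [hmdef, PySem.List.max?_id_cons]; rfl
    have hW : ∀ s : Nat, 1 ≤ s → (s : Int) < k → tail.getD ((j + s) % tail.length) 0 < m := by
      intro s h1 h2
      exact hWpre s (by omega) h1
    have hm : ∀ c ∈ tail, c ≤ m := by
      intro c hc
      rw [hmfold]
      exact (PySem.List.le_foldl_max tail p0).2 c hc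
    have hkL : k ≤ (tail.length : Int) := by
      simp only [List.length_cons] at hkn
      push_cast at hkn ⊢; omega
    -- unfold both ports on the k < n branch
    simp only [getPotentialOfWinner, getPotentialOfWinner_alt]
    rw [if_neg hkn, if_neg hkn]
    simp only [PySem.List.pyGet?_zero_cons, PySem.List.slice_from_one, List.tail_cons]
    have hfuel : 3 * (p0 :: tail).length + 3 = tail.length + (2 * tail.length + 6) := by
      simp only [List.length_cons]; omega
    rw [hfuel]
    have hpass := pvPass1 p0 tail k tail 0 p0 0 (2 * tail.length + 6)
      (by intro h; rw [h] at hL; simp at hL) (by simp)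
    simp only [Nat.cast_zero, zero_add] at hpass
    rw [hpass]
    cases hb : bLoop k p0 0 tail with
    | some v => simp
    | none =>
      simp only
      have hfst : (tail.foldl pvStep (p0, 0)).1 = m := by
        rw [pvFoldFst, hmfold]
      have hbounds := pvBNone k tail p0 0 (le_refl 0) (by omega) hb
      rw [hfst]
      have hadv := pvAdv p0 tail k m j hm hj hk1 hW j 0 (tail.foldl pvStep (p0, 0)).2
        (2 * tail.length + 6) hL (Or.inl ⟨by omega, by omega⟩) hbounds.1 hbounds.2
        (by omega)
      simp only [Nat.cast_zero, zero_add] at hadv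
      rw [hadv]
      rfl
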